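-- pv_equiv track=rewrite | github.com/ozmalabs/ozma | agent/multiseat/game_launcher.py | _vdf_tokenize
-- ===== SOURCE A (Python) =====
-- def _vdf_tokenize(text: str) -> list[str]:
--     """Tokenize VDF text into strings and braces."""
--     tokens: list[str] = []
--     i = 0
--     length = len(text)
--     while i < length:
--         c = text[i]
--         if c in " \t\r\n":
--             i += 1
--         elif c == "/" and i + 1 < length and text[i + 1] == "/":
--             # Line comment
--             while i < length and text[i] != "\n":
--                 i += 1
--         elif c in "{}":
--             tokens.append(c)
--             i += 1
--         elif c == '"':
--             # Quoted string
--             i += 1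
--             start = i
--             while i < length and text[i] != '"':
--                 if text[i] == "\\" and i + 1 < length:
--                     i += 2
--                 else:
--                     i += 1
--             tokens.append(text[start:i])
--             if i < length:
--                 i += 1  # skip closing quote
--         else:
--             # Unquoted token (some VDF files use these)
--             start = i
--             while i < length and text[i] not in ' \t\r\n{}\"':
--                 i += 1
--             tokens.append(text[start:i])
--
--     return tokens
-- ===== SOURCE B (Python) =====
-- def _vdf_tokenize(text: str) -> list[str]:
--     """Tokenize VDF text into strings and braces (single-pass character DFA)."""
--     DEFAULT, SLASH, COMMENT, UNQUOTED, QUOTED, QESC = range(6)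
--     tokens: list[str] = []
--     state = DEFAULT
--     buf: list[str] = []
--     for c in text:
--         if state == DEFAULT:
--             if c in " \t\r\n":
--                 pass
--             elif c in "{}":
--                 tokens.append(c)
--             elif c == '"':
--                 buf = []
--                 state = QUOTED
--             elif c == "/":
--                 state = SLASH
--             else:
--                 buf = [c]
--                 state = UNQUOTED
--         elif state == SLASH:
--             if c == "/":
--                 state = COMMENT
--             elif c in " \t\r\n":
--                 tokens.append("/")
--                 state = DEFAULT
--             elif c in "{}":
--                 tokens.append("/")
--                 tokens.append(c)
--                 state = DEFAULT
--             elif c == '"':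
--                 tokens.append("/")
--                 buf = []
--                 state = QUOTED
--             else:
--                 buf = ["/", c]
--                 state = UNQUOTED
--         elif state == COMMENT:
--             if c == "\n":
--                 state = DEFAULT
--         elif state == UNQUOTED:
--             if c in " \t\r\n":
--                 tokens.append("".join(buf))
--                 state = DEFAULT
--             elif c in "{}":
--                 tokens.append("".join(buf))
--                 tokens.append(c)
--                 state = DEFAULT
--             elif c == '"':
--                 tokens.append("".join(buf))
--                 buf = []
--                 state = QUOTED
--             else:
--                 buf.append(c)
--         elif state == QUOTED:
--             if c == '"':
--                 tokens.append("".join(buf))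
--                 state = DEFAULT
--             elif c == "\\":
--                 state = QESC
--             else:
--                 buf.append(c)
--         else:  # QESC
--             buf.append("\\")
--             buf.append(c)
--             state = QUOTED
--     if state == SLASH:
--         tokens.append("/")
--     elif state == UNQUOTED or state == QUOTED:
--         tokens.append("".join(buf))
--     elif state == QESC:
--         tokens.append("".join(buf) + "\\")
--     return tokens
-- ===== Notes on version B (the rewrite author's own statement) =====
-- stated objective: alternative
-- what changed: Replaces A's index-walking while loop with nested inner scans and slicing by a single forward pass: a character-level DFA (states default/slash/comment/unquoted/quoted/escape) folded over the text with an explicit token buffer, no indexing or slicing.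
import Mathlib
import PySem

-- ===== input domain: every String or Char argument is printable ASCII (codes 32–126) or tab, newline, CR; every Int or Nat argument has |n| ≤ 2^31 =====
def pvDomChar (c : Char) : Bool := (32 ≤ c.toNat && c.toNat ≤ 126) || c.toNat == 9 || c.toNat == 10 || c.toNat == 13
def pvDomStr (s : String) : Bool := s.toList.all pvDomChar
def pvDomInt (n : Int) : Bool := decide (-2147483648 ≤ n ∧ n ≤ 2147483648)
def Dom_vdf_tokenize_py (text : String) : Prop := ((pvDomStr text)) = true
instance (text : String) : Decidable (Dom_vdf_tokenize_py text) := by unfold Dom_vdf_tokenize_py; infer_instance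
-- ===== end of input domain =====

-- B replaces A's index-walking loop with nested inner scans by a single-pass character DFA
-- (explicit state + token buffer, one fold over the characters); objective: alternative structure, same cost.

-- ===== PORT A =====
-- A's inner quoted-string loop: returns (scanned body, remaining suffix starting at the closing quote, if any)
def aQuoted : List Char → List Char × List Char
  | [] => ([], [])
  | c :: rest =>
    if c = '"' then ([], c :: rest)
    else if c = '\\' then
      match rest with
      | [] => ([c], [])                         -- lone trailing backslash: i += 1, loop ends
      | d :: rest' =>
        let (b, r) := aQuoted rest'             -- i += 2
        (c :: d :: b, r)
    else
      let (b, r) := aQuoted rest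
      (c :: b, r)

-- equation-shape lemmas for aQuoted (cited by aMain's termination proof and the proofs below)
theorem aQuoted_nil : aQuoted [] = ([], []) := rfl
theorem aQuoted_quote (rest : List Char) : aQuoted ('"' :: rest) = ([], '"' :: rest) := by
  rw [aQuoted.eq_def]; simp
theorem aQuoted_esc_nil : aQuoted ['\\'] = (['\\'], []) := by
  rw [aQuoted.eq_def]; simp
theorem aQuoted_esc (d : Char) (rest' : List Char) :
    aQuoted ('\\' :: d :: rest') = ('\\' :: d :: (aQuoted rest').1, (aQuoted rest').2) := by
  rcases hq : aQuoted rest' with ⟨b, r⟩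
  rw [aQuoted.eq_def]; simp [hq]
theorem aQuoted_cons (c : Char) (rest : List Char) (h1 : c ≠ '"') (h2 : c ≠ '\\') :
    aQuoted (c :: rest) = (c :: (aQuoted rest).1, (aQuoted rest).2) := by
  rcases hq : aQuoted rest with ⟨b, r⟩
  rw [aQuoted.eq_def]; simp [h1, h2, hq]

theorem aQuoted_snd_len : ∀ l : List Char, (aQuoted l).2.length ≤ l.length := by
  intro l
  induction l using aQuoted.induct with
  | case1 => simp [aQuoted_nil]
  | case2 rest' => simp [aQuoted_quote]
  | case3 h => simp [aQuoted_esc_nil]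
  | case4 d rest' b r hbr h ih => simp [aQuoted_esc]; omega
  | case5 d rest' h1 h2 b r hbr ih => simp [aQuoted_cons d rest' h1 h2]; omega

-- chars that end an unquoted token
def aStop (c : Char) : Bool := c = ' ' || c = '\t' || c = '\r' || c = '\n' || c = '{' || c = '}' || c = '"'

theorem aStop_false (c : Char) (h1 : ¬(c = ' ' ∨ c = '\t' ∨ c = '\r' ∨ c = '\n'))
    (h3 : ¬(c = '{' ∨ c = '}')) (h4 : ¬c = '"') : aStop c = false := by
  push_neg at h1 h3
  simp only [aStop, Bool.or_eq_false_iff, decide_eq_false_iff_not]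
  tauto

-- A's main while-loop, recursing on the remaining characters
def aMain : List Char → List String
  | [] => []
  | c :: rest =>
    if c = ' ' ∨ c = '\t' ∨ c = '\r' ∨ c = '\n' then
      aMain rest
    else if c = '/' ∧ rest.head? = some '/' then
      aMain ((c :: rest).dropWhile (· ≠ '\n'))      -- line comment: skip to the newline
    else if c = '{' ∨ c = '}' then
      String.mk [c] :: aMain rest
    else if c = '"' then
      String.mk (aQuoted rest).1 :: aMain (aQuoted rest).2.tail  -- 'if i < length: i += 1' skips the closing quote
    else
      String.mk ((c :: rest).takeWhile (fun d => !aStop d)) ::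
        aMain ((c :: rest).dropWhile (fun d => !aStop d))
  termination_by l => l.length
  decreasing_by
  · simp
  · rename_i h1 hcm
    obtain ⟨hc, _⟩ := hcm
    subst hc
    rw [List.dropWhile_cons]
    rw [if_pos (by decide)]
    simp only [ne_eq, decide_not, List.length_cons]
    have h := List.length_dropWhile_le (p := fun x => !decide (x = '\n')) rest
    omega
  · simp
  · have h := aQuoted_snd_len rest
    simp
    omega
  · rename_i h1 h2 h3 h4
    have hstop := aStop_false c h1 h3 h4
    have h := List.length_dropWhile_le (p := fun d => !aStop d) rest
    rw [List.dropWhile_cons, if_pos (by simp [hstop])]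
    simp
    omega

def vdf_tokenize_py (text : String) : List String := aMain text.toList

-- ===== PORT B =====
inductive BMode
  | default | slash | comment
  | unquoted : List Char → BMode
  | quoted : List Char → BMode
  | qesc : List Char → BMode
deriving DecidableEq, Repr

def bIsWs (c : Char) : Bool := c = ' ' || c = '\t' || c = '\r' || c = '\n'

def bStep : List String × BMode → Char → List String × BMode
  | (toks, .default), c =>
    if bIsWs c then (toks, .default)
    else if c = '{' ∨ c = '}' then (toks ++ [String.mk [c]], .default)
    else if c = '"' then (toks, .quoted [])
    else if c = '/' then (toks, .slash)
    else (toks, .unquoted [c])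
  | (toks, .slash), c =>
    if c = '/' then (toks, .comment)
    else if bIsWs c then (toks ++ [String.mk ['/']], .default)
    else if c = '{' ∨ c = '}' then (toks ++ [String.mk ['/'], String.mk [c]], .default)
    else if c = '"' then (toks ++ [String.mk ['/']], .quoted [])
    else (toks, .unquoted ['/', c])
  | (toks, .comment), c =>
    if c = '\n' then (toks, .default) else (toks, .comment)
  | (toks, .unquoted buf), c =>
    if bIsWs c then (toks ++ [String.mk buf], .default)
    else if c = '{' ∨ c = '}' then (toks ++ [String.mk buf, String.mk [c]], .default)
    else if c = '"' then (toks ++ [String.mk buf], .quoted [])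
    else (toks, .unquoted (buf ++ [c]))
  | (toks, .quoted buf), c =>
    if c = '"' then (toks ++ [String.mk buf], .default)
    else if c = '\\' then (toks, .qesc buf)
    else (toks, .quoted (buf ++ [c]))
  | (toks, .qesc buf), c => (toks, .quoted (buf ++ ['\\', c]))

def bFinish : List String × BMode → List String
  | (toks, .default) => toks
  | (toks, .comment) => toks
  | (toks, .slash) => toks ++ [String.mk ['/']]
  | (toks, .unquoted buf) => toks ++ [String.mk buf]
  | (toks, .quoted buf) => toks ++ [String.mk buf]
  | (toks, .qesc buf) => toks ++ [String.mk (buf ++ ['\\'])]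

def vdf_tokenize_py_alt (text : String) : List String :=
  bFinish (text.toList.foldl bStep ([], .default))

-- ===== PRECONDITION & SPEC =====
def Spec_vdf_tokenize_py (text : String) (out : List String) : Prop := out = vdf_tokenize_py_alt text
instance (text : String) (out : List String) : Decidable (Spec_vdf_tokenize_py text out) := by unfold Spec_vdf_tokenize_py; infer_instance

-- ===== CLAIM (what is proved, stated in full; the proofs are below) =====
def Claim_equal_vdf_tokenize_py : Prop := ∀ (text : String), Dom_vdf_tokenize_py text → Spec_vdf_tokenize_py text (vdf_tokenize_py text)

-- ===== LEMMAS AND PROOFS =====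

theorem bStep_split (toks : List String) (m : BMode) (c : Char) :
    bStep (toks, m) c = (toks ++ (bStep ([], m) c).1, (bStep ([], m) c).2) := by
  cases m <;> simp only [bStep] <;> (try split_ifs) <;> simp

-- run of B's DFA from a given mode, with no tokens accumulated yet
def bRun (m : BMode) (cs : List Char) : List String := bFinish (cs.foldl bStep ([], m))

theorem bFrame : ∀ (cs : List Char) (toks : List String) (m : BMode),
    bFinish (cs.foldl bStep (toks, m)) = toks ++ bRun m cs := by
  intro cs
  induction cs with
  | nil => intro toks m; cases m <;> simp [bRun, bFinish]
  | cons c cs ih =>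
    intro toks m
    rcases hs : bStep ([], m) c with ⟨d, m'⟩
    have hts := bStep_split toks m c
    rw [hs] at hts
    rw [List.foldl_cons, hts, ih]
    conv_rhs => rw [bRun, List.foldl_cons, hs, ih]
    simp

theorem bRun_cons (c : Char) (cs : List Char) (m : BMode) :
    bRun m (c :: cs) = (bStep ([], m) c).1 ++ bRun (bStep ([], m) c).2 cs := by
  rcases hs : bStep ([], m) c with ⟨d, m'⟩
  rw [bRun, List.foldl_cons, hs, bFrame]

theorem bRun_ws (c : Char) (cs : List Char) (h : bIsWs c = true) :
    bRun .default (c :: cs) = bRun .default cs := by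
  rw [bRun_cons]
  have hs : bStep ([], .default) c = ([], .default) := by simp [bStep, h]
  rw [hs]
  simp

theorem bRun_comment : ∀ cs : List Char,
    bRun .comment cs = bRun .default (cs.dropWhile (· ≠ '\n')) := by
  intro cs
  induction cs with
  | nil => simp [bRun, bFinish]
  | cons c cs ih =>
    rw [bRun_cons, List.dropWhile_cons]
    by_cases h : c = '\n'
    · subst h
      have hs : bStep ([], .comment) '\n' = ([], .default) := by simp [bStep]
      rw [hs, if_neg (by simp)]
      rw [bRun_ws '\n' cs (by decide)]
      simp
    · have hs : bStep ([], .comment) c = ([], .comment) := by simp [bStep, h]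
      rw [hs, if_pos (by simp [h])]
      simpa using ih

theorem bRun_quoted : ∀ (cs : List Char) (buf : List Char),
    bRun (.quoted buf) cs
      = String.mk (buf ++ (aQuoted cs).1) :: bRun .default (aQuoted cs).2.tail := by
  intro cs
  induction cs using aQuoted.induct with
  | case1 => intro buf; simp [bRun, bFinish, aQuoted_nil]
  | case2 rest' =>
    intro buf
    have hs : bStep ([], .quoted buf) '"' = ([String.mk buf], .default) := by simp [bStep]
    rw [bRun_cons, hs, aQuoted_quote]
    simp
  | case3 h =>
    intro buf
    have hs : bStep ([], .quoted buf) '\\' = ([], .qesc buf) := by simp [bStep]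
    rw [bRun_cons, hs, aQuoted_esc_nil]
    simp [bRun, bFinish]
  | case4 d rest' b r hbr h ih =>
    intro buf
    have hs : bStep ([], .quoted buf) '\\' = ([], .qesc buf) := by simp [bStep]
    have hs2 : bStep ([], .qesc buf) d = ([], .quoted (buf ++ ['\\', d])) := by simp [bStep]
    rw [bRun_cons, hs]
    simp only [List.nil_append]
    rw [bRun_cons, hs2]
    simp only [List.nil_append]
    rw [ih, aQuoted_esc]
    simp
  | case5 d rest' h1 h2 b r hbr ih =>
    intro buf
    have hs : bStep ([], .quoted buf) d = ([], .quoted (buf ++ [d])) := by simp [bStep, h1, h2]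
    rw [bRun_cons, hs]
    simp only [List.nil_append]
    rw [ih, aQuoted_cons d rest' h1 h2]
    simp

theorem bRun_unquoted : ∀ (cs : List Char) (buf : List Char),
    bRun (.unquoted buf) cs
      = String.mk (buf ++ cs.takeWhile (fun d => !aStop d))
          :: bRun .default (cs.dropWhile (fun d => !aStop d)) := by
  intro cs
  induction cs with
  | nil => intro buf; simp [bRun, bFinish]
  | cons c cs ih =>
    intro buf
    rw [bRun_cons, List.takeWhile_cons, List.dropWhile_cons]
    by_cases hws : bIsWs c = true
    · have hstop : aStop c = true := by
        simp only [bIsWs, Bool.or_eq_true, decide_eq_true_eq] at hws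
        simp only [aStop, Bool.or_eq_true, decide_eq_true_eq]
        tauto
      have hs : bStep ([], .unquoted buf) c = ([String.mk buf], .default) := by
        simp [bStep, hws]
      rw [hs, if_neg (by simp [hstop]), if_neg (by simp [hstop])]
      rw [bRun_ws c cs hws]
      simp
    · by_cases hbr : c = '{' ∨ c = '}'
      · have hstop : aStop c = true := by
          simp only [aStop, Bool.or_eq_true, decide_eq_true_eq]; tauto
        have hs : bStep ([], .unquoted buf) c
            = ([String.mk buf, String.mk [c]], .default) := by
          simp [bStep, hws, hbr]
        rw [hs, if_neg (by simp [hstop]), if_neg (by simp [hstop])]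
        have hs2 : bStep ([], .default) c = ([String.mk [c]], .default) := by
          simp [bStep, hws, hbr]
        rw [bRun_cons, hs2]
        simp
      · by_cases hq : c = '"'
        · subst hq
          have hstop : aStop '"' = true := by decide
          have hs : bStep ([], .unquoted buf) '"' = ([String.mk buf], .quoted []) := by
            simp [bStep, show bIsWs '"' = false from by decide]
          rw [hs, if_neg (by simp [hstop]), if_neg (by simp [hstop])]
          have hs2 : bStep ([], .default) '"' = ([], .quoted []) := by
            simp [bStep, show bIsWs '"' = false from by decide]
          rw [bRun_cons, hs2]
          simp
        · have hstop : aStop c = false := by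
            simp only [bIsWs, Bool.or_eq_true, decide_eq_true_eq] at hws
            push_neg at hbr
            simp only [aStop, Bool.or_eq_false_iff, decide_eq_false_iff_not]
            tauto
          have hs : bStep ([], .unquoted buf) c = ([], .unquoted (buf ++ [c])) := by
            simp [bStep, hws, hbr, hq]
          rw [hs, if_pos (by simp [hstop]), if_pos (by simp [hstop])]
          simp only [List.nil_append]
          rw [ih]
          simp

theorem bRun_slash (cs : List Char) (h : cs.head? ≠ some '/') :
    bRun .slash cs = bRun (.unquoted ['/']) cs := by
  cases cs with
  | nil => simp [bRun, bFinish]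
  | cons d rest =>
    have hd : d ≠ '/' := by simpa using h
    rw [bRun_cons, bRun_cons]
    have : bStep ([], BMode.slash) d = bStep ([], BMode.unquoted ['/']) d := by
      simp only [bStep, hd, if_false]
      split_ifs <;> simp
    rw [this]

theorem main_eq : ∀ cs : List Char, aMain cs = bRun .default cs := by
  intro cs
  induction cs using aMain.induct with
  | case1 => simp [aMain, bRun, bFinish]
  | case2 c rest h ih =>
    rw [aMain, if_pos h, ih, bRun_ws]
    simp only [bIsWs, Bool.or_eq_true, decide_eq_true_eq]
    tauto
  | case3 c rest h1 h2 ih =>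
    obtain ⟨hc, hh⟩ := h2
    subst hc
    rw [aMain, if_neg h1, if_pos ⟨rfl, hh⟩] at *
    cases rest with
    | nil => simp at hh
    | cons d rest2 =>
      have hd : d = '/' := by simpa using hh
      subst hd
      rw [ih, bRun_cons]
      have hs : bStep ([], .default) '/' = ([], .slash) := by simp [bStep, bIsWs]
      rw [hs]
      simp only [List.nil_append]
      rw [bRun_cons]
      have hs2 : bStep ([], .slash) '/' = ([], .comment) := by simp [bStep]
      rw [hs2]
      simp only [List.nil_append]
      rw [bRun_comment]
      rw [List.dropWhile_cons, if_pos (by decide), List.dropWhile_cons, if_pos (by decide)]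
  | case4 c rest h1 h2 h3 ih =>
    rw [aMain, if_neg h1, if_neg h2, if_pos h3, ih, bRun_cons]
    have hws : bIsWs c = false := by
      simp only [bIsWs, Bool.or_eq_false_iff, decide_eq_false_iff_not]
      push_neg at h1
      tauto
    have hs : bStep ([], .default) c = ([String.mk [c]], .default) := by
      simp [bStep, hws, h3]
    rw [hs]
    simp
  | case5 rest h1 h2 h3 ih =>
    rw [aMain, if_neg h1, if_neg h2, if_neg h3, if_pos rfl, ih, bRun_cons]
    have hs : bStep ([], .default) '"' = ([], .quoted []) := by simp [bStep, bIsWs]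
    rw [hs]
    simp only [List.nil_append]
    rw [bRun_quoted]
    simp
  | case6 c rest h1 h2 h3 h4 ih =>
    rw [aMain, if_neg h1, if_neg h2, if_neg h3, if_neg h4, ih, bRun_cons]
    have hws : bIsWs c = false := by
      simp only [bIsWs, Bool.or_eq_false_iff, decide_eq_false_iff_not]
      push_neg at h1
      tauto
    have hstop := aStop_false c h1 h3 h4
    by_cases hsl : c = '/'
    · subst hsl
      have hs : bStep ([], .default) '/' = ([], .slash) := by simp [bStep, bIsWs]
      rw [hs]
      simp only [List.nil_append]
      have hh : rest.head? ≠ some '/' := fun hx => h2 ⟨rfl, hx⟩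
      rw [bRun_slash rest hh, bRun_unquoted]
      rw [List.takeWhile_cons, if_pos (by simp [hstop]),
          List.dropWhile_cons, if_pos (by simp [hstop])]
      simp
    · have hs : bStep ([], .default) c = ([], .unquoted [c]) := by
        simp [bStep, hws, h3, h4, hsl]
      rw [hs]
      simp only [List.nil_append]
      rw [bRun_unquoted]
      rw [List.takeWhile_cons, if_pos (by simp [hstop]),
          List.dropWhile_cons, if_pos (by simp [hstop])]
      simp

-- ===== VERDICT (by name: the statement is the Claim_ definition above) =====
theorem vdf_tokenize_py_spec : Claim_equal_vdf_tokenize_py := by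
  intro text _
  unfold Spec_vdf_tokenize_py vdf_tokenize_py vdf_tokenize_py_alt
  rw [main_eq]
  rfl
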